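-- pv_equiv track=rewrite | github.com/mcglynnk/AdhereID_app | functions.py | color_burden_chart
-- ===== SOURCE A (Python) =====
-- def color_burden_chart(vals_labels):
--     colors5 = ["#e8f8fc", '#47caeb', "#17aacf", "#1284a1"]
--     burdenlist = []
--     for i in vals_labels:
--         if 'Not at all hard to take' in i:
--             i = list(i)
--             i.append(colors5[0])
--             burdenlist.append(tuple(i))
--         elif 'A little hard to take' in i:
--             i = list(i)
--             i.append(colors5[1])
--             burdenlist.append(tuple(i))
--         elif 'Somewhat hard to take' in i:
--             i = list(i)
--             i.append(colors5[2])
--             burdenlist.append(tuple(i))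
--         elif 'Very hard to take' in i:
--             i = list(i)
--             i.append(colors5[3])
--             burdenlist.append(tuple(i))
--
--     return burdenlist
-- ===== SOURCE B (Python) =====
-- def color_burden_chart(vals_labels):
--     # Inverted traversal: instead of testing each known label against the item,
--     # scan the item's own elements through a rank dictionary and keep the
--     # minimal rank found; that minimum reproduces the chain's priority order.
--     rank = {'Not at all hard to take': 0,
--             'A little hard to take': 1,
--             'Somewhat hard to take': 2,
--             'Very hard to take': 3}
--     colors5 = ["#e8f8fc", '#47caeb', "#17aacf", "#1284a1"]
--     burdenlist = []
--     for item in vals_labels: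
--         best = min((rank[x] for x in item if x in rank), default=None)
--         if best is not None:
--             burdenlist.append(tuple(item) + (colors5[best],))
--     return burdenlist
-- ===== Notes on version B (the rewrite author's own statement) =====
-- stated objective: alternative
-- what changed: A tests each of the four known labels against the item with an if/elif chain; B inverts the traversal: it scans the item's own elements through a label->rank dictionary and takes the minimal rank found (min with default=None), then indexes the color list, so no per-label membership test over the item remains.
import Mathlib
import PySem

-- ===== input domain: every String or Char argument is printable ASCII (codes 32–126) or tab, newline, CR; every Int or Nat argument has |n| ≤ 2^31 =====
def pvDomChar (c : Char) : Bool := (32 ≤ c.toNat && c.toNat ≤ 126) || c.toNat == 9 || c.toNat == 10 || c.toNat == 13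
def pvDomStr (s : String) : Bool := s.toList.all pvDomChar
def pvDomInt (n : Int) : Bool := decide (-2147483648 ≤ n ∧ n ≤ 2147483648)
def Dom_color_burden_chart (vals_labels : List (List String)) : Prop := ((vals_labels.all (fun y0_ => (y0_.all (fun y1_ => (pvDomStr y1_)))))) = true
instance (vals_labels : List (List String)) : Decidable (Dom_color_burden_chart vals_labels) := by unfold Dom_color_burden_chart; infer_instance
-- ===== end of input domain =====

-- B inverts A's traversal: instead of testing each label against the item, it scans the
-- item's elements through a label→rank dictionary and keeps the minimal rank (alternative).

-- ===== PORT A =====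
-- A: if/elif chain over the four labels, appending the matching color; no match → skip.
def color_burden_chart (vals_labels : List (List String)) : List (List String) :=
  vals_labels.foldl (fun burdenlist i =>
    if "Not at all hard to take" ∈ i then burdenlist ++ [i ++ ["#e8f8fc"]]
    else if "A little hard to take" ∈ i then burdenlist ++ [i ++ ["#47caeb"]]
    else if "Somewhat hard to take" ∈ i then burdenlist ++ [i ++ ["#17aacf"]]
    else if "Very hard to take" ∈ i then burdenlist ++ [i ++ ["#1284a1"]]
    else burdenlist) []

-- ===== PORT B =====
def cbcRank : PySem.Dict String Int :=
  PySem.Dict.ofList [("Not at all hard to take", 0),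
                     ("A little hard to take", 1),
                     ("Somewhat hard to take", 2),
                     ("Very hard to take", 3)]

def cbcColors : List String := ["#e8f8fc", "#47caeb", "#17aacf", "#1284a1"]

-- B: best = min((rank[x] for x in item if x in rank), default=None); colors5[best].
def color_burden_chart_alt (vals_labels : List (List String)) : List (List String) :=
  vals_labels.foldl (fun burdenlist item =>
    match PySem.List.min? (item.filterMap (fun x => cbcRank.get? x)) (fun r => r) with
    | some best =>
        match PySem.List.pyGet? cbcColors best with
        | some c => burdenlist ++ [item ++ [c]]
        | none => burdenlist
    | none => burdenlist) []

-- ===== PRECONDITION & SPEC =====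
def Spec_color_burden_chart (vals_labels : List (List String)) (out : List (List String)) : Prop := out = color_burden_chart_alt vals_labels
instance (vals_labels : List (List String)) (out : List (List String)) : Decidable (Spec_color_burden_chart vals_labels out) := by unfold Spec_color_burden_chart; infer_instance

-- ===== CLAIM =====
def Claim_equal_color_burden_chart : Prop := ∀ (vals_labels : List (List String)), Dom_color_burden_chart vals_labels → Spec_color_burden_chart vals_labels (color_burden_chart vals_labels)

-- ===== LEMMAS AND PROOFS =====

-- the minimal rank among the item's elements that are labels, as A's chain computes it
def cbcChain (i : List String) : Option Int :=
  if "Not at all hard to take" ∈ i then some 0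
  else if "A little hard to take" ∈ i then some 1
  else if "Somewhat hard to take" ∈ i then some 2
  else if "Very hard to take" ∈ i then some 3
  else none

theorem cbc_min_cons (x : Int) (t : List Int) :
    PySem.List.min? (x :: t) (fun r => r) =
      match PySem.List.min? t (fun r => r) with
      | none => some x
      | some m => some (min x m) := by
  cases t with
  | nil => simp [PySem.List.min?]
  | cons b t' =>
    rw [PySem.List.min?_id_cons, PySem.List.min?_id_cons]
    show some (List.foldl min (min x b) t') = some (min x (List.foldl min b t'))
    rw [List.foldl_assoc]

theorem cbc_minfm (i : List String) :
    PySem.List.min? (i.filterMap (fun x => cbcRank.get? x)) (fun r => r) = cbcChain i := by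
  induction i with
  | nil => simp [cbcChain, PySem.List.min?]
  | cons x xs ih =>
    by_cases h0 : x = "Not at all hard to take"
    · subst h0
      simp only [List.filterMap_cons]
      rw [show cbcRank.get? "Not at all hard to take" = some 0 from by decide]
      rw [cbc_min_cons, ih]
      unfold cbcChain
      simp only [List.mem_cons, true_or, if_pos, List.mem_cons]
      split_ifs <;> simp_all <;> omega
    by_cases h1 : x = "A little hard to take"
    · subst h1
      simp only [List.filterMap_cons]
      rw [show cbcRank.get? "A little hard to take" = some 1 from by decide]
      rw [cbc_min_cons, ih]
      unfold cbcChain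
      simp only [List.mem_cons]
      split_ifs <;> simp_all <;> omega
    by_cases h2 : x = "Somewhat hard to take"
    · subst h2
      simp only [List.filterMap_cons]
      rw [show cbcRank.get? "Somewhat hard to take" = some 2 from by decide]
      rw [cbc_min_cons, ih]
      unfold cbcChain
      simp only [List.mem_cons]
      split_ifs <;> simp_all <;> omega
    by_cases h3 : x = "Very hard to take"
    · subst h3
      simp only [List.filterMap_cons]
      rw [show cbcRank.get? "Very hard to take" = some 3 from by decide]
      rw [cbc_min_cons, ih]
      unfold cbcChain
      simp only [List.mem_cons]
      split_ifs <;> simp_all <;> omega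
    · have b0 : ("Not at all hard to take" == x) = false := beq_eq_false_iff_ne.mpr (Ne.symm h0)
      have b1 : ("A little hard to take" == x) = false := beq_eq_false_iff_ne.mpr (Ne.symm h1)
      have b2 : ("Somewhat hard to take" == x) = false := beq_eq_false_iff_ne.mpr (Ne.symm h2)
      have b3 : ("Very hard to take" == x) = false := beq_eq_false_iff_ne.mpr (Ne.symm h3)
      have hR : cbcRank = PySem.Dict.mk [("Not at all hard to take", (0:Int)),
          ("A little hard to take", 1), ("Somewhat hard to take", 2),
          ("Very hard to take", 3)] := by decide
      have hg : cbcRank.get? x = none := by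
        rw [hR]
        simp [PySem.Dict.get?_mk_cons, PySem.Dict.get?, b0, b1, b2, b3]
      simp only [List.filterMap_cons, hg]
      rw [ih]
      unfold cbcChain
      have e0 : ("Not at all hard to take" = x ∨ "Not at all hard to take" ∈ xs) ↔ "Not at all hard to take" ∈ xs := by simp [Ne.symm h0]
      have e1 : ("A little hard to take" = x ∨ "A little hard to take" ∈ xs) ↔ "A little hard to take" ∈ xs := by simp [Ne.symm h1]
      have e2 : ("Somewhat hard to take" = x ∨ "Somewhat hard to take" ∈ xs) ↔ "Somewhat hard to take" ∈ xs := by simp [Ne.symm h2]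
      have e3 : ("Very hard to take" = x ∨ "Very hard to take" ∈ xs) ↔ "Very hard to take" ∈ xs := by simp [Ne.symm h3]
      simp only [List.mem_cons, e0, e1, e2, e3]

theorem cbc_step_eq (burdenlist : List (List String)) (i : List String) :
    (if "Not at all hard to take" ∈ i then burdenlist ++ [i ++ ["#e8f8fc"]]
     else if "A little hard to take" ∈ i then burdenlist ++ [i ++ ["#47caeb"]]
     else if "Somewhat hard to take" ∈ i then burdenlist ++ [i ++ ["#17aacf"]]
     else if "Very hard to take" ∈ i then burdenlist ++ [i ++ ["#1284a1"]]
     else burdenlist)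
    = (match PySem.List.min? (i.filterMap (fun x => cbcRank.get? x)) (fun r => r) with
       | some best =>
           match PySem.List.pyGet? cbcColors best with
           | some c => burdenlist ++ [i ++ [c]]
           | none => burdenlist
       | none => burdenlist) := by
  rw [cbc_minfm]
  unfold cbcChain
  split_ifs <;> simp [cbcColors, PySem.List.pyGet?, PySem.List.pyIdx?]

-- ===== VERDICT =====
theorem color_burden_chart_spec : Claim_equal_color_burden_chart := by
  intro vals_labels _
  unfold Spec_color_burden_chart color_burden_chart color_burden_chart_alt
  congr 1
  funext burdenlist i
  exact cbc_step_eq burdenlist i
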